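-- pv_equiv track=rewrite | github.com/981377660LMT/algorithm-study | 11_动态规划/lis最长上升子序列问题/Longest Consecutively Increasing Substring.py | solve
-- ===== SOURCE A (Python) =====
-- from functools import lru_cache
--
-- def solve(s):
--     @lru_cache(None)
--     def dfs(index: int, pre: int) -> int:
--         if index == len(s) or pre == ord('z'):
--             return 0
--         res = 0
--         if pre == -1:
--             # 选起点'a'
--             if s[index] == '?':
--                 res = max(res, 1 + dfs(index + 1, ord('a')), dfs(index + 1, pre))
--             elif s[index] == 'a':
--                 res = max(res, 1 + dfs(index + 1, ord('a')))
--         else: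
--             if s[index] == '?':
--                 res = max(res, 1 + dfs(index + 1, pre + 1), dfs(index + 1, pre))
--             elif ord(s[index]) == pre + 1:
--                 res = max(res, 1 + dfs(index + 1, ord(s[index])))
--
--         return res
--
--     return max(dfs(i, -1) for i in range(len(s)))
-- ===== SOURCE B (Python) =====
-- def solve(s):
--     # Bottom-up DP: row index j encodes pre (-1 -> 0, chr(96+j) -> j for 1..26).
--     nxt = [0] * 27
--     starts = []
--     for c in reversed(s):
--         cur = [0] * 27
--         for j in range(26):
--             if c == '?':
--                 cur[j] = max(1 + nxt[j + 1], nxt[j])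
--             elif ord(c) == 97 + j:
--                 cur[j] = 1 + nxt[j + 1]
--         starts.append(cur[0])
--         nxt = cur
--     return max(starts)
-- ===== Notes on version B (the rewrite author's own statement) =====
-- stated objective: alternative
-- what changed: Replaces the lru_cache top-down recursion over (index, pre) with an explicit bottom-up DP: one 27-entry row per position computed right-to-left from the next row, collecting the pre=-1 start values and taking their max.
import Mathlib
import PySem

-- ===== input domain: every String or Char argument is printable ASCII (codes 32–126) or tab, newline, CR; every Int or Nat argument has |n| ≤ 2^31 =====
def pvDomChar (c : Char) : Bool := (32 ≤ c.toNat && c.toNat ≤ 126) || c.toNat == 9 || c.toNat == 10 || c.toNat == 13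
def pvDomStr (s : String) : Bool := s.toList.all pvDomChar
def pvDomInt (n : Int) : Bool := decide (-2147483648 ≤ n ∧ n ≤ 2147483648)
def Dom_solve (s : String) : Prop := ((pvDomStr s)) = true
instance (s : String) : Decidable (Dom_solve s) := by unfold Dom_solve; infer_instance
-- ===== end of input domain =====

-- B replaces the memoized recursion by an explicit bottom-up DP table over (position, previous letter); same values, no recursion.

-- ===== PORT A =====
-- dfs(index, pre) ported structurally on the suffix s[index:] (lru_cache is a
-- pure-speed detail; the recursion and branch order are A's).
def dfsA : List Char → Int → Int
  | [], _ => 0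
  | c :: t, pre =>
    if pre = 122 then 0
    else if pre = -1 then
      if c = '?' then max (max 0 (1 + dfsA t 97)) (dfsA t (-1))
      else if c = 'a' then max 0 (1 + dfsA t 97)
      else 0
    else
      if c = '?' then max (max 0 (1 + dfsA t (pre + 1))) (dfsA t pre)
      else if (c.toNat : Int) = pre + 1 then max 0 (1 + dfsA t (c.toNat : Int))
      else 0

-- max(dfs(i, -1) for i in range(len(s))); Python raises ValueError on the
-- empty string — excluded by Pre_solve, getD 0 is never the claimed value there.
def solve (s : String) : Int :=
  (PySem.List.max? ((List.range s.toList.length).map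
      (fun i => dfsA (s.toList.drop i) (-1))) (fun y => y)).getD 0

-- ===== PORT B =====
-- one DP row: cur[j] from c and the next row (j = 0 is pre = -1, j ≥ 1 is pre = 96 + j)
def mkRowB (c : Char) (nxt : List Int) : List Int :=
  (List.range 27).map (fun j =>
    if j < 26 then
      if c = '?' then max (1 + nxt.getD (j + 1) 0) (nxt.getD j 0)
      else if (c.toNat : Int) = 97 + (j : Int) then 1 + nxt.getD (j + 1) 0
      else 0
    else 0)

def solve_alt (s : String) : Int :=
  let fin := s.toList.reverse.foldl
    (fun (st : List Int × List Int) (c : Char) =>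
      let cur := mkRowB c st.1
      (cur, st.2 ++ [cur.getD 0 0]))
    (List.replicate 27 0, [])
  (PySem.List.max? fin.2 (fun y => y)).getD 0

-- ===== PRECONDITION & SPEC =====
-- Pre_ excludes only the empty string, where Python's max() over an empty
-- generator raises ValueError in A (and in B alike).
def Pre_solve (s : String) : Prop := s ≠ ""
instance (s : String) : Decidable (Pre_solve s) := by unfold Pre_solve; infer_instance
def pvWitness_solve : String := "a?c"

def Spec_solve (s : String) (out : Int) : Prop := out = solve_alt s
instance (s : String) (out : Int) : Decidable (Spec_solve s out) := by unfold Spec_solve; infer_instance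

-- ===== CLAIM (what is proved, stated in full; the proofs are below) =====
def Claim_equal_solve : Prop := ∀ (s : String), Dom_solve s → Pre_solve s → Spec_solve s (solve s)

-- ===== LEMMAS AND PROOFS =====

-- pre index encoding used by B's rows
def preOf (j : Nat) : Int := if j = 0 then -1 else 96 + (j : Int)

-- the row of dfs-values for a suffix t
def specRow (t : List Char) : List Int := (List.range 27).map (fun j => dfsA t (preOf j))

theorem dfsA_nonneg (t : List Char) (pre : Int) : 0 ≤ dfsA t pre := by
  induction t generalizing pre with
  | nil => simp [dfsA]
  | cons c t ih =>
    simp only [dfsA]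
    split_ifs <;> simp

theorem specRow_base : specRow [] = List.replicate 27 0 := by
  simp [specRow, dfsA]

theorem char_eq_of_toNat {c d : Char} (h : c.toNat = d.toNat) : c = d := by
  exact Char.ext (UInt32.toNat_inj.mp h)

theorem preOf_succ (j : Nat) (h : j ≠ 0) : preOf (j + 1) = preOf j + 1 := by
  simp [preOf, h]
  ring

theorem mkRow_entry (c : Char) (t : List Char) (j : Nat) (hj : j < 27) :
    (mkRowB c (specRow t)).getD j 0 = dfsA (c :: t) (preOf j) := by
  have hne : ∀ k : Nat, k < 27 → (specRow t).getD k 0 = dfsA t (preOf k) := by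
    intro k hk
    simp [specRow, List.getD_eq_getElem?_getD, hk]
  have habs : ∀ x : Int, max 0 (1 + dfsA t x) = 1 + dfsA t x := by
    intro x
    have := dfsA_nonneg t x
    omega
  have hLHS : (mkRowB c (specRow t)).getD j 0 =
      (if j < 26 then
        if c = '?' then max (1 + (specRow t).getD (j + 1) 0) ((specRow t).getD j 0)
        else if (c.toNat : Int) = 97 + (j : Int) then 1 + (specRow t).getD (j + 1) 0
        else 0
      else 0) := by
    simp [mkRowB, List.getD_eq_getElem?_getD, hj]
  rw [hLHS]
  by_cases h26 : j = 26
  · subst h26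
    simp [preOf, dfsA]
  · have hjlt : j < 26 := by omega
    rw [if_pos hjlt, hne j hj, hne (j + 1) (by omega)]
    by_cases h0 : j = 0
    · subst h0
      simp only [preOf]
      norm_num
      by_cases hq : c = '?'
      · simp [hq, dfsA, habs]
      · by_cases ha : c = 'a'
        · simp [ha, dfsA, habs]
        · have hna : ¬ ((c.toNat : Int) = 97) := by
            intro h
            exact ha (char_eq_of_toNat (by exact_mod_cast h))
          simp [hq, ha, hna, dfsA]
    · have hpre : preOf j = 96 + (j : Int) := by simp [preOf, h0]
      have hnz : ¬ (preOf j = 122) := by rw [hpre]; omega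
      have hnm : ¬ (preOf j = -1) := by rw [hpre]; omega
      rw [preOf_succ j h0]
      by_cases hq : c = '?'
      · simp only [dfsA, if_neg hnz, if_neg hnm, if_pos hq]
        rw [habs]
      · by_cases hc : (c.toNat : Int) = 97 + (j : Int)
        · have hc' : (c.toNat : Int) = preOf j + 1 := by rw [hpre]; omega
          simp only [dfsA, if_neg hnz, if_neg hnm, if_neg hq, hc']
          simp [habs]
          intro hx
          omega
        · have hc' : ¬ ((c.toNat : Int) = preOf j + 1) := by rw [hpre]; omega
          simp [dfsA, hnz, hnm, hq, hc, hc']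

theorem mkRowB_specRow (c : Char) (t : List Char) :
    mkRowB c (specRow t) = specRow (c :: t) := by
  apply List.ext_getElem
  · simp [mkRowB, specRow]
  intro j h1 h2
  have hj : j < 27 := by simpa [mkRowB] using h1
  have h := mkRow_entry c t j hj
  simp only [List.getD_eq_getElem?_getD, List.getElem?_eq_getElem h1, Option.getD_some] at h
  rw [h]
  simp [specRow]

-- fold invariant: processing reversed input builds specRow and the start list
def suffStarts : List Char → List Char → List Int
  | [], _ => []
  | c :: r, t => dfsA (c :: t) (-1) :: suffStarts r (c :: t)

theorem fold_inv (r t : List Char) (st : List Int) :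
    r.foldl (fun (st : List Int × List Int) (c : Char) =>
        (mkRowB c st.1, st.2 ++ [(mkRowB c st.1).getD 0 0]))
      (specRow t, st)
    = (specRow (r.reverse ++ t), st ++ suffStarts r t) := by
  induction r generalizing t st with
  | nil => simp [suffStarts]
  | cons c r ih =>
    simp only [List.foldl_cons, suffStarts]
    rw [mkRowB_specRow]
    have h0 : (specRow (c :: t)).getD 0 0 = dfsA (c :: t) (-1) := by
      simp [specRow, List.getD_eq_getElem?_getD, preOf]
    rw [h0, ih]
    simp

theorem suffStarts_eq (r t : List Char) :
    suffStarts r t =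
      ((List.range r.length).map (fun i => dfsA ((r.reverse ++ t).drop i) (-1))).reverse := by
  induction r generalizing t with
  | nil => simp [suffStarts]
  | cons c r ih =>
    have hlen' : r.length = r.reverse.length := by simp
    simp only [suffStarts, List.length_cons, List.range_succ, List.map_append,
      List.map_cons, List.map_nil, List.reverse_append, List.reverse_cons,
      List.reverse_nil, List.nil_append, List.singleton_append, List.append_assoc]
    rw [ih (c :: t)]
    congr 1
    rw [hlen', List.drop_left]

theorem max_reverse (l : List Int) (h : l ≠ []) :
    (PySem.List.max? l.reverse (fun y => y)).getD 0 = (PySem.List.max? l (fun y => y)).getD 0 := by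
  cases hm1 : PySem.List.max? l.reverse (fun y => (y : Int)) with
  | none =>
    rw [PySem.List.max?_eq_none_iff] at hm1
    simp at hm1
    exact absurd hm1 h
  | some m1 =>
    cases hm2 : PySem.List.max? l (fun y => (y : Int)) with
    | none =>
      rw [PySem.List.max?_eq_none_iff] at hm2
      exact absurd hm2 h
    | some m2 =>
      have h1m := PySem.List.max?_mem hm1
      have h2m := PySem.List.max?_mem hm2
      have h1x := PySem.List.max?_isMax hm1
      have h2x := PySem.List.max?_isMax hm2
      simp only [Option.getD_some]
      exact le_antisymm (h2x m1 (List.mem_reverse.mp h1m)) (h1x m2 (List.mem_reverse.mpr h2m))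

-- ===== VERDICT (by name: the statement is the Claim_ definition above) =====
theorem solve_spec : Claim_equal_solve := by
  intro s _ hpre
  unfold Spec_solve solve solve_alt
  have hbase : (List.replicate 27 0, ([] : List Int)) = (specRow [], ([] : List Int)) := by
    rw [specRow_base]
  rw [hbase]
  have hfold := fold_inv s.toList.reverse [] []
  have hstep : ∀ (st : List Int × List Int) (c : Char),
      (fun (st : List Int × List Int) (c : Char) =>
        let cur := mkRowB c st.1
        (cur, st.2 ++ [cur.getD 0 0])) st c
      = (fun (st : List Int × List Int) (c : Char) =>
        (mkRowB c st.1, st.2 ++ [(mkRowB c st.1).getD 0 0])) st c := by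
    intro st c
    rfl
  rw [funext fun st => funext fun c => hstep st c, hfold]
  have hlen : s.toList.reverse.length = s.toList.length := by simp
  rw [suffStarts_eq, hlen]
  simp only [List.reverse_reverse, List.append_nil, List.nil_append]
  refine (max_reverse _ ?_).symm
  have hne : s.toList ≠ [] := by
    intro hx
    exact hpre (by cases s; simp at hx; simp [hx])
  intro hx
  rw [List.map_eq_nil_iff, List.range_eq_nil] at hx
  exact hne (List.length_eq_zero_iff.mp hx)
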